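-- pv_equiv track=rewrite | github.com/taraj-shah/search_engine | tokenizer.py | handleAcronym
-- ===== SOURCE A (Python) =====
-- def handleAcronym(s: str) -> str:
--     ''' Handles strings that contain acronyms
--     '''
--     newS = ""
--
--     # if length contains "."
--     if "." not in s:
--         return s
--
--     # if length is 0, return empty str
--     if len(s) == 0:
--         return newS
--
--     # if last char is '.' do not include it
--     if s[-1] == '.':
--         s = s[0:-1]
--
--     # Normalize acronyms
--     for i in range(len(s) - 1):
--         if s[i] == '.' and s[i + 1].isalpha():
--             newS += s[i + 1]
--         else:
--             newS += s[i]
--     if len(s) > 0: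
--         newS += s[-1]
--
--     return newS
-- ===== SOURCE B (Python) =====
-- def handleAcronym(s: str) -> str:
--     ''' Handles strings that contain acronyms '''
--     if "." not in s:
--         return s
--     if s.endswith("."):
--         s = s[:-1]
--     # split on dots and rejoin: each dot becomes the first char of the
--     # following segment when that char is a letter, otherwise stays a dot
--     parts = s.split(".")
--     out = [parts[0]]
--     for q in parts[1:]:
--         out.append(q[0] if q[:1].isalpha() else ".")
--         out.append(q)
--     return "".join(out)
-- ===== Notes on version B (the rewrite author's own statement) =====
-- stated objective: alternative
-- what changed: Replaced A's character-by-character index loop over range(len(s)-1) with a split-and-rejoin pass: the string is cut into dot-free segments and each dot is re-emitted as the first character of the following segment when that character is a letter, otherwise kept as a dot.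
import Mathlib
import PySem

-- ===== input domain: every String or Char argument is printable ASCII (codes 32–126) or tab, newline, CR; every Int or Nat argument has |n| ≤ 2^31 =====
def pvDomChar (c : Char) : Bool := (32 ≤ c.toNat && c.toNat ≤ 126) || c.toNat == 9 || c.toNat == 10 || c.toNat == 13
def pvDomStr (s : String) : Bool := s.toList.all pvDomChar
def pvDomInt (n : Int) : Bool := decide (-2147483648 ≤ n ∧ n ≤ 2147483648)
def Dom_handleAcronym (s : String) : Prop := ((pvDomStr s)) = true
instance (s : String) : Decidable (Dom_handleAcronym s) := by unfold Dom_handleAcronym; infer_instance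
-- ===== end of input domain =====

-- B replaces A's index loop with a split-on-dots-and-rejoin pass (a dot before a letter becomes that letter); alternative decomposition, same cost.


-- ===== PORT A =====
-- literal transliteration of A: index loop over range(len(s)-1) appending chars to newS
def handleAcronym (s : String) : String :=
  let newS : List Char := []
  let l := s.toList
  if !(PySem.Chars.isIn ['.'] l) then s
  else if l.length = 0 then String.ofList newS
  else
    let l := if PySem.List.pyGetD l (-1) ' ' == '.' then PySem.List.slice l (some 0) (some (-1)) else l
    let newS := (PySem.List.pyRange 0 ((l.length : Int) - 1) 1).foldl
      (fun acc i =>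
        if PySem.List.pyGetD l i ' ' == '.' && PySem.Chars.isalpha (PySem.List.pyGetD l (i + 1) ' ')
        then acc ++ [PySem.List.pyGetD l (i + 1) ' ']
        else acc ++ [PySem.List.pyGetD l i ' ']) newS
    let newS := if l.length > 0 then newS ++ [PySem.List.pyGetD l (-1) ' '] else newS
    String.ofList newS

-- ===== PORT B =====
-- literal transliteration of B: split on '.', rebuild each dot from the head of the following segment, join
def handleAcronym_alt (s : String) : String :=
  let l := s.toList
  if !(PySem.Chars.isIn ['.'] l) then s
  else
    let l := if PySem.Chars.endswith l ['.'] then PySem.List.slice l none (some (-1)) else l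
    let parts := l.splitOn '.'      -- s.split(".") ported as the corresponding library function
    let out : List (List Char) := [parts.headI]
    let out := parts.tail.foldl
      (fun acc q =>
        acc ++ [if PySem.Chars.strIsalpha (PySem.List.slice q none (some 1))
                then [PySem.List.pyGetD q 0 ' '] else ['.'], q]) out
    String.ofList out.flatten

-- ===== PRECONDITION & SPEC =====
def Spec_handleAcronym (s : String) (out : String) : Prop := out = handleAcronym_alt s
instance (s : String) (out : String) : Decidable (Spec_handleAcronym s out) := by unfold Spec_handleAcronym; infer_instance

-- ===== CLAIM (what is proved, stated in full; the proofs are below) =====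
def Claim_equal_handleAcronym : Prop := ∀ (s : String), Dom_handleAcronym s → Spec_handleAcronym s (handleAcronym s)

-- ===== LEMMAS AND PROOFS =====

-- the common value: pairwise normalization, defined by structural recursion
def pvG : List Char → List Char
  | [] => []
  | [c] => [c]
  | c :: d :: t => (if c == '.' && PySem.Chars.isalpha d then d else c) :: pvG (d :: t)

-- B's per-dot replacement piece
def pvRepl (q : List Char) : List Char :=
  if PySem.Chars.strIsalpha (PySem.List.slice q none (some 1))
  then [PySem.List.pyGetD q 0 ' '] else ['.']

-- a one-char suffix test is a test on the last element
theorem pv_singleton_suffix_iff (c d : Char) (xs : List Char) : [c] <:+ (xs ++ [d]) ↔ c = d := by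
  constructor
  · rintro ⟨t, ht⟩
    have := congrArg List.getLast? ht
    simpa using this
  · rintro rfl; exact ⟨xs, rfl⟩

theorem pv_endswith_dot (xs : List Char) (d : Char) :
    PySem.Chars.endswith (xs ++ [d]) ['.'] = (d == '.') := by
  rw [Bool.eq_iff_iff]
  simp [PySem.Chars.endswith, List.isSuffixOf_iff_suffix, pv_singleton_suffix_iff]
  exact eq_comm

-- ===== A side: the indexed fold plus the final append computes pvG =====

theorem pv_loop_eq_zip (l : List Char) :
    (PySem.List.pyRange 0 ((l.length : Int) - 1) 1).map
      (fun i =>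
        if PySem.List.pyGetD l i ' ' == '.' && PySem.Chars.isalpha (PySem.List.pyGetD l (i + 1) ' ')
        then PySem.List.pyGetD l (i + 1) ' '
        else PySem.List.pyGetD l i ' ') =
    (l.zip l.tail).map
      (fun p => if p.1 == '.' && PySem.Chars.isalpha p.2 then p.2 else p.1) := by
  rcases l with _ | ⟨a, t⟩
  · simp [PySem.List.pyRange]
  · set l := a :: t with hl
    have hn : ((l.length : Int) - 1) = ((l.length - 1 : Nat) : Int) := by
      simp [hl]
    rw [hn, PySem.List.pyRange_zero_natCast, List.map_map]
    apply List.ext_getElem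
    · simp [hl]
    · intro i h1 h2
      have hi : i < l.length - 1 := by simpa [hl] using h1
      have hi1 : i + 1 < l.length := by omega
      simp only [List.getElem_map, List.getElem_range, Function.comp,
        List.getElem_zip, List.getElem_tail]
      rw [show ((i : Int) + 1) = ((i + 1 : Nat) : Int) by push_cast; ring]
      rw [PySem.List.pyGetD_natCast, PySem.List.pyGetD_natCast,
        List.getD_eq_getElem _ _ (by omega), List.getD_eq_getElem _ _ (by omega)]

theorem pv_zip_last_eq_g (l : List Char) :
    (l.zip l.tail).map
      (fun p => if p.1 == '.' && PySem.Chars.isalpha p.2 then p.2 else p.1) ++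
      l.drop (l.length - 1) = pvG l := by
  induction l with
  | nil => simp [pvG]
  | cons c t ih =>
    cases t with
    | nil => simp [pvG]
    | cons d t' =>
      have : (c :: d :: t').drop ((c :: d :: t').length - 1) =
          (d :: t').drop ((d :: t').length - 1) := by
        simp
      simp only [List.zip_cons_cons, List.tail_cons, List.map_cons, List.cons_append, this, pvG]
      rw [← ih]
      simp

theorem pv_core (l : List Char) :
    (PySem.List.pyRange 0 ((l.length : Int) - 1) 1).foldl
      (fun acc i =>
        if PySem.List.pyGetD l i ' ' == '.' && PySem.Chars.isalpha (PySem.List.pyGetD l (i + 1) ' ')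
        then acc ++ [PySem.List.pyGetD l (i + 1) ' ']
        else acc ++ [PySem.List.pyGetD l i ' ']) [] ++
      (if l.length > 0 then [PySem.List.pyGetD l (-1) ' '] else []) = pvG l := by
  have hfold :
      (PySem.List.pyRange 0 ((l.length : Int) - 1) 1).foldl
        (fun acc i =>
          if PySem.List.pyGetD l i ' ' == '.' && PySem.Chars.isalpha (PySem.List.pyGetD l (i + 1) ' ')
          then acc ++ [PySem.List.pyGetD l (i + 1) ' ']
          else acc ++ [PySem.List.pyGetD l i ' ']) [] =
      (PySem.List.pyRange 0 ((l.length : Int) - 1) 1).map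
        (fun i =>
          if PySem.List.pyGetD l i ' ' == '.' && PySem.Chars.isalpha (PySem.List.pyGetD l (i + 1) ' ')
          then PySem.List.pyGetD l (i + 1) ' '
          else PySem.List.pyGetD l i ' ') := by
    have hb : (fun (acc : List Char) i =>
        if PySem.List.pyGetD l i ' ' == '.' && PySem.Chars.isalpha (PySem.List.pyGetD l (i + 1) ' ')
        then acc ++ [PySem.List.pyGetD l (i + 1) ' ']
        else acc ++ [PySem.List.pyGetD l i ' ']) = fun (acc : List Char) i => acc ++
          [if PySem.List.pyGetD l i ' ' == '.' && PySem.Chars.isalpha (PySem.List.pyGetD l (i + 1) ' ')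
           then PySem.List.pyGetD l (i + 1) ' '
           else PySem.List.pyGetD l i ' '] := by
      funext acc i; split <;> rfl
    rw [hb, PySem.List.foldl_append_singleton_eq_map]
    simp
  rw [hfold, pv_loop_eq_zip, ← pv_zip_last_eq_g]
  congr 1
  rcases l.eq_nil_or_concat with rfl | ⟨xs, d, rfl⟩
  · simp
  · simp only [List.concat_eq_append]
    have hne : xs ++ [d] ≠ [] := by simp
    rw [List.drop_length_sub_one hne]
    simp [PySem.List.pyGetD_neg_one _ ' ' hne]

-- on the dotted branch both programs strip the same trailing dot
theorem pv_strip_eq (l : List Char) (hne : l ≠ []) :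
    (if PySem.List.pyGetD l (-1) ' ' == '.' then PySem.List.slice l (some 0) (some (-1)) else l) =
    (if PySem.Chars.endswith l ['.'] then PySem.List.slice l none (some (-1)) else l) := by
  rcases l.eq_nil_or_concat with rfl | ⟨xs, d, rfl⟩
  · simp at hne
  · simp only [List.concat_eq_append]
    have hne' : xs ++ [d] ≠ [] := by simp
    rw [pv_endswith_dot, PySem.List.pyGetD_neg_one _ ' ' hne',
      PySem.List.slice_zero_start]
    simp

-- ===== B side: the split-and-rejoin fold computes pvG =====

theorem pv_flatten_fold (rest : List (List Char)) (init : List (List Char)) :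
    (rest.foldl (fun acc q => acc ++ [pvRepl q, q]) init).flatten =
    init.flatten ++ rest.flatMap (fun q => pvRepl q ++ q) := by
  induction rest generalizing init with
  | nil => simp
  | cons q t ih =>
    rw [List.foldl_cons, ih]
    simp [List.flatMap_cons]

theorem pv_splitOnP_ne_nil (l : List Char) : List.splitOnP (fun x => x == '.') l ≠ [] :=
  List.splitOnP_ne_nil _ l

theorem pv_repl_nil : pvRepl [] = ['.'] := by decide

theorem pv_repl_cons (d : Char) (p : List Char) :
    pvRepl (d :: p) = if PySem.Chars.isalpha d then [d] else ['.'] := by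
  unfold pvRepl
  simp [PySem.List.slice, PySem.List.pyGetD, PySem.List.pyGet?, PySem.List.pyIdx?,
    PySem.Chars.strIsalpha]

theorem pv_rejoin_eq_g (l : List Char) :
    (List.splitOnP (fun x => x == '.') l).headI ++
      (List.splitOnP (fun x => x == '.') l).tail.flatMap (fun q => pvRepl q ++ q) = pvG l := by
  induction l with
  | nil => simp [List.splitOnP_nil, pvG]
  | cons c t ih =>
    rcases hs : List.splitOnP (fun x => x == '.') t with _ | ⟨p, rest⟩
    · exact absurd hs (pv_splitOnP_ne_nil t)
    · rw [hs] at ih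
      simp only [List.headI, List.tail] at ih
      by_cases hc : c = '.'
      · subst hc
        rw [List.splitOnP_cons, if_pos (show (('.' : Char) == '.') = true by decide), hs]
        simp only [List.headI, List.tail, List.flatMap_cons, List.nil_append]
        rw [List.append_assoc, ih]
        -- pvG ('.' :: t) = pvRepl p ++ pvG t
        cases t with
        | nil =>
          simp [List.splitOnP_nil] at hs
          simp [hs.1, pvG, pv_repl_nil]
        | cons d t' =>
          rw [List.splitOnP_cons] at hs
          by_cases hd : d = '.'
          · subst hd
            rw [if_pos (show (('.' : Char) == '.') = true by decide)] at hs
            have hp : p = [] := ((List.cons_eq_cons.mp hs).1).symm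
            have hna : PySem.Chars.isalpha '.' = false := by decide
            simp [pvG, hp, pv_repl_nil, hna]
          · rw [if_neg (by simpa using hd)] at hs
            rcases hq : List.splitOnP (fun x => x == '.') t' with _ | ⟨p', rest'⟩
            · exact absurd hq (pv_splitOnP_ne_nil t')
            · rw [hq] at hs
              simp only [List.modifyHead] at hs
              have hp : p = d :: p' := ((List.cons_eq_cons.mp hs).1).symm
              rw [hp, pv_repl_cons]
              simp only [pvG, show (('.' : Char) == '.') = true by decide, Bool.true_and]
              by_cases ha : PySem.Chars.isalpha d
              · simp [ha]
              · simp [ha]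
      · rw [List.splitOnP_cons, if_neg (by simpa using hc), hs]
        simp only [List.modifyHead, List.headI, List.tail, List.cons_append]
        rw [ih]
        cases t with
        | nil => simp [pvG]
        | cons d t' =>
          simp only [pvG]
          rw [show (c == '.') = false by simpa using hc]
          simp

-- ===== VERDICT (by name: the statement is the Claim_ definition above) =====
theorem handleAcronym_spec : Claim_equal_handleAcronym := by
  intro s _
  unfold Spec_handleAcronym handleAcronym handleAcronym_alt
  by_cases hin : PySem.Chars.isIn ['.'] s.toList
  · have hne : s.toList ≠ [] := by
      intro h
      rw [h] at hin
      simp [PySem.Chars.isIn, PySem.Chars.find] at hin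
      exact hin (by decide)
    have hlen : ¬ (s.toList.length = 0) := by
      simpa [List.length_eq_zero_iff] using hne
    simp only [hin, Bool.not_true, Bool.false_eq_true, if_false, if_neg hlen]
    rw [pv_strip_eq s.toList hne]
    set l' := (if PySem.Chars.endswith s.toList ['.'] then PySem.List.slice s.toList none (some (-1)) else s.toList) with hl'
    apply congrArg String.ofList
    -- B side computes pvG l'
    rw [show (fun (acc : List (List Char)) (q : List Char) =>
        acc ++ [if PySem.Chars.strIsalpha (PySem.List.slice q none (some 1))
                then [PySem.List.pyGetD q 0 ' '] else ['.'], q]) =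
        (fun acc q => acc ++ [pvRepl q, q]) from rfl]
    rw [pv_flatten_fold]
    simp only [List.flatten_cons, List.flatten_nil, List.append_nil]
    rw [show l'.splitOn '.' = List.splitOnP (fun x => x == '.') l' from rfl,
      pv_rejoin_eq_g l']
    -- A side computes pvG l'
    have hcore := pv_core l'
    by_cases h0 : l'.length > 0
    · rw [if_pos h0]
      rw [if_pos h0] at hcore
      exact hcore
    · rw [if_neg h0]
      rw [if_neg h0] at hcore
      simpa using hcore
  · simp [hin]
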